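-- pv_equiv track=rewrite | github.com/stosik/coding-challenges | daily-challenge/day-22.py | get_sentence_split
-- ===== SOURCE A (Python) =====
-- def get_sentence_split(s, words):
--   if not s or not words:
--     return []
--
--   sentence_words = list()
--   for i in range(len(s)):
--     if s[0:i + 1] in words:
--       sentence_words.append(s[0:i + 1])
--       words.remove(s[0:i + 1])
--       sentence_words += get_sentence_split(s[i + 1:], words)
--       break
--
--   return sentence_words
-- ===== SOURCE B (Python) =====
-- def get_sentence_split(s, words):
--     # Iterative rewrite of the greedy shortest-prefix split; mutates `words`
--     # in place (remove) exactly like the original.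
--     if not s or not words:
--         return []
--     result = []
--     while s:
--         for i in range(len(s)):
--             w = s[:i + 1]
--             if w in words:
--                 result.append(w)
--                 words.remove(w)
--                 s = s[i + 1:]
--                 break
--         else:
--             break
--     return result
-- ===== Notes on version B (the rewrite author's own statement) =====
-- stated objective: alternative
-- what changed: Replaced the recursive greedy split (recursing on the remaining suffix and concatenating) with an explicit iterative while-loop that keeps an accumulator list and uses for-else to stop when no prefix matches; the in-place mutation of words is preserved.
import Mathlib
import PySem

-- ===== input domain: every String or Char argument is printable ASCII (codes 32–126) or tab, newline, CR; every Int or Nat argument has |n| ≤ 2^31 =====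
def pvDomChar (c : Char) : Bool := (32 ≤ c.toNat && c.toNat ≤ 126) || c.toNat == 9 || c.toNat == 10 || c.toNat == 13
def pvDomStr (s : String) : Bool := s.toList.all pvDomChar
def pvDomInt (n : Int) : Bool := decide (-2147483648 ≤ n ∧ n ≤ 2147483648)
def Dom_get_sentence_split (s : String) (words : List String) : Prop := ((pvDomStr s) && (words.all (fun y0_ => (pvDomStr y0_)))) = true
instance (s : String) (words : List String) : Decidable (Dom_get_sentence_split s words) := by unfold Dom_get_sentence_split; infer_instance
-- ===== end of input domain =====

-- B replaces the suffix recursion by an iterative loop with an accumulator (for-else style);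
-- equivalence is about the RETURN value (both Pythons mutate `words` in place identically).

-- ===== PORT A =====
-- A's recursion, on the character list of s.  The inner `for i in range(len(s))` with
-- `break` is the first index i with s[0:i+1] in words, i.e. find? over range.
-- `words.remove(w)` removes the first occurrence of w, which is `List.erase` here
-- (exact because it is only executed when w ∈ words, so no ValueError is reachable).
def get_sentence_split_core (s : List Char) (words : List String) : List String :=
  if h : s = [] ∨ words = [] then []
  else
    match (List.range s.length).find?
        (fun i => words.contains (String.mk (s.take (i + 1)))) with
    | none => []
    | some i =>
        let w := String.mk (s.take (i + 1))
        w :: get_sentence_split_core (s.drop (i + 1)) (words.erase w)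
termination_by s.length
decreasing_by
  simp only [List.length_drop]
  have : s ≠ [] := by tauto
  have : 0 < s.length := List.length_pos_iff.mpr this
  omega

def get_sentence_split (s : String) (words : List String) : List String :=
  get_sentence_split_core s.toList words

-- ===== PORT B =====
-- B's inner `for` scan: grow the candidate prefix one character at a time; on the first
-- hit return the matched prefix and the remaining suffix, on fall-through return none.
def pvAltScan (pref : List Char) (rest : List Char) (words : List String) :
    Option (List Char × List Char) :=
  match rest with
  | [] => none
  | c :: r =>
      let p := pref ++ [c]
      if words.contains (String.mk p) then some (p, r) else pvAltScan p r words

-- termination helper for the loop below: a scan hit strictly shrinks the string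
theorem pvAltScan_shrinks (pref s : List Char) (words : List String)
    (p : List Char) (r : List Char) (h : pvAltScan pref s words = some (p, r)) :
    r.length < s.length := by
  induction s generalizing pref with
  | nil => simp [pvAltScan] at h
  | cons c t ih =>
    simp only [pvAltScan] at h
    split at h
    · cases h; simp
    · have := ih (pref ++ [c]) h
      simp only [List.length_cons]
      omega


-- B's `while s:` loop with the `result` accumulator; for-else fall-through ends the loop.
def pvAltLoop (s : List Char) (words : List String) (acc : List String) : List String :=
  if s = [] then acc
  else
    match h : pvAltScan [] s words with
    | none => acc
    | some (p, r) =>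
        pvAltLoop r (words.erase (String.mk p)) (acc ++ [String.mk p])
termination_by s.length
decreasing_by
  have := pvAltScan_shrinks [] s words p r h
  simpa using this

def get_sentence_split_alt (s : String) (words : List String) : List String :=
  if s.toList = [] ∨ words = [] then []
  else pvAltLoop s.toList words []

-- ===== PRECONDITION & SPEC =====
def Spec_get_sentence_split (s : String) (words : List String) (out : List String) : Prop := out = get_sentence_split_alt s words
instance (s : String) (words : List String) (out : List String) : Decidable (Spec_get_sentence_split s words out) := by unfold Spec_get_sentence_split; infer_instance

-- ===== CLAIM (what is proved, stated in full; the proofs are below) =====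
def Claim_equal_get_sentence_split : Prop := ∀ (s : String) (words : List String), Dom_get_sentence_split s words → Spec_get_sentence_split s words (get_sentence_split s words)

-- ===== LEMMAS AND PROOFS =====

-- find? over range(n+1): test 0 first, then shift.
theorem pv_find_range_succ (n : Nat) (p : Nat → Bool) :
    (List.range (n + 1)).find? p =
      if p 0 then some 0 else ((List.range n).find? (fun j => p (j + 1))).map (· + 1) := by
  rw [List.range_succ_eq_map, List.find?_cons, List.find?_map]
  split <;> rename_i h
  · simp_all
  · simp_all [Function.comp_def]

-- B's incremental scan agrees with A's indexed scan over range(len rest).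
theorem pvAltScan_eq (rest : List Char) : ∀ (pref : List Char) (words : List String),
    pvAltScan pref rest words =
      match (List.range rest.length).find?
          (fun j => words.contains (String.mk (pref ++ rest.take (j + 1)))) with
      | none => none
      | some j => some (pref ++ rest.take (j + 1), rest.drop (j + 1)) := by
  induction rest with
  | nil => intro pref words; simp [pvAltScan]
  | cons c r ih =>
    intro pref words
    simp only [pvAltScan, List.length_cons]
    rw [pv_find_range_succ]
    have hpred : (fun j => words.contains (String.mk (pref ++ (c :: r).take (j + 1 + 1))))
        = (fun j => words.contains (String.mk ((pref ++ [c]) ++ r.take (j + 1)))) := by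
      funext j
      simp [List.take_succ_cons, List.append_assoc]
    by_cases hc : words.contains (String.mk (pref ++ [c]))
    · simp only [List.take_succ_cons, List.take_zero, List.append_nil] at *
      rw [if_pos hc, if_pos hc]
      simp
    · simp only [List.take_succ_cons, List.take_zero, List.append_nil] at hc hpred ⊢
      rw [if_neg hc, if_neg hc, ih (pref ++ [c]) words]
      rw [show (fun j => words.contains (String.mk (pref ++ c :: List.take (j + 1) r)))
            = (fun j => words.contains (String.mk (pref ++ [c] ++ r.take (j + 1)))) from hpred]
      cases hf : (List.range r.length).find?
          (fun j => words.contains (String.mk (pref ++ [c] ++ r.take (j + 1)))) with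
      | none => simp
      | some j => simp [List.append_assoc]

-- If A's scan finds a hit, words is nonempty.
theorem pv_words_ne_of_find (s : List Char) (words : List String) (i : Nat)
    (h : (List.range s.length).find?
        (fun i => words.contains (String.mk (s.take (i + 1)))) = some i) :
    words ≠ [] := by
  intro hw
  subst hw
  have := List.find?_some h
  simp at this

-- One step of B's loop, read off from the result of the scan.
theorem pvAltLoop_of_none (s : List Char) (words acc : List String) (hs : s ≠ [])
    (hn : pvAltScan [] s words = none) : pvAltLoop s words acc = acc := by
  rw [pvAltLoop, if_neg hs]
  split
  · rfl
  · simp_all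

theorem pvAltLoop_of_some (s : List Char) (words acc : List String) (hs : s ≠ [])
    (p r : List Char) (hm : pvAltScan [] s words = some (p, r)) :
    pvAltLoop s words acc =
      pvAltLoop r (words.erase (String.mk p)) (acc ++ [String.mk p]) := by
  rw [pvAltLoop, if_neg hs]
  split
  · simp_all
  · rename_i p' r' heq
    rw [hm] at heq
    cases heq
    rfl

-- Loop invariant: B's loop computes acc ++ (A's recursion).
theorem pv_loop_eq_core (n : Nat) : ∀ (s : List Char) (words : List String) (acc : List String),
    s.length ≤ n → pvAltLoop s words acc = acc ++ get_sentence_split_core s words := by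
  induction n with
  | zero =>
    intro s words acc hn
    have hs : s = [] := by
      cases s with
      | nil => rfl
      | cons a t => simp at hn
    subst hs
    simp [pvAltLoop, get_sentence_split_core]
  | succ n ih =>
    intro s words acc hn
    by_cases hs : s = []
    · subst hs; simp [pvAltLoop, get_sentence_split_core]
    · have hscan := pvAltScan_eq s [] words
      simp only [List.nil_append] at hscan
      cases hf : (List.range s.length).find?
          (fun j => words.contains (String.mk (s.take (j + 1)))) with
      | none =>
        rw [hf] at hscan
        rw [pvAltLoop_of_none s words acc hs hscan, get_sentence_split_core]
        split
        · simp
        · simp only [hf]; simp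
      | some j =>
        rw [hf] at hscan
        have hw : words ≠ [] := pv_words_ne_of_find s words j hf
        rw [pvAltLoop_of_some s words acc hs _ _ hscan,
          get_sentence_split_core, dif_neg (by tauto)]
        simp only [hf]
        have hlen : (s.drop (j + 1)).length ≤ n := by
          have : 0 < s.length := List.length_pos_iff.mpr hs
          simp only [List.length_drop]
          omega
        rw [ih (s.drop (j + 1)) (words.erase (String.mk (s.take (j + 1))))
          (acc ++ [String.mk (s.take (j + 1))]) hlen]
        simp

-- ===== VERDICT (by name: the statement is the Claim_ definition above) =====
theorem get_sentence_split_spec : Claim_equal_get_sentence_split := by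
  intro s words _
  unfold Spec_get_sentence_split get_sentence_split get_sentence_split_alt
  by_cases h : s.toList = [] ∨ words = []
  · rw [if_pos h, get_sentence_split_core, dif_pos h]
  · rw [if_neg h, pv_loop_eq_core s.toList.length s.toList words [] le_rfl]
    simp
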